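-- pv_equiv track=rewrite | github.com/fstrnad/geoutils | geoutils/utils/general_utils.py | add_compliment
-- ===== SOURCE A (Python) =====
-- def add_compliment(arr):
--     """
--     Takes an array of integers and appends the negative of each integer (except 0)
--     to the array, ensuring that the resulting array starts with the lowest integer,
--     ends with the highest integer, and contains 0 in the middle.
--
--     Args:
--         arr (list): The input array of integers.
--
--     Returns:
--         list: The updated array with negative integers appended, sorted in ascending order,
--               with 0 in the middle.
--
--     """
--     new_arr = []
--     for num in arr:
--         if num != 0:
--             new_arr.append(num)
--             new_arr.append(-1 * num)
--     new_arr.sort()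
--     if 0 not in new_arr:
--         new_arr.insert(len(new_arr) // 2, 0)
--     return new_arr
-- ===== SOURCE B (Python) =====
-- def add_compliment(arr):
--     m = sorted(abs(n) for n in arr if n != 0)
--     return [-x for x in reversed(m)] + [0] + m
-- ===== Notes on version B (the rewrite author's own statement) =====
-- stated objective: simpler
-- what changed: Instead of doubling the array with each value and its negation, sorting the doubled list and inserting 0 at the midpoint, B sorts only the absolute values of the nonzero entries and mirrors that half: ascending negatives, then 0, then ascending positives.
import Mathlib
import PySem

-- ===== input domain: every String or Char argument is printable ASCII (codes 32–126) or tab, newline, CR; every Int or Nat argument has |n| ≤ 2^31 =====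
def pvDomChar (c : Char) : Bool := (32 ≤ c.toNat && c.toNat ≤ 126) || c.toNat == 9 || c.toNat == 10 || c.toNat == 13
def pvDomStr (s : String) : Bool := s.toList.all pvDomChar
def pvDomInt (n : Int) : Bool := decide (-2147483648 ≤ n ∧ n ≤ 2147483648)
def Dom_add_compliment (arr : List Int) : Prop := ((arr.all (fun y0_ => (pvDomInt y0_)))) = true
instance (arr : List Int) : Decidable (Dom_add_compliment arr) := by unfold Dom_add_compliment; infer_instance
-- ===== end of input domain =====

-- B mirrors the sorted absolute values of the nonzero entries around 0 instead of
-- sorting the doubled list and inserting 0 at its midpoint (simpler decomposition).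


-- ===== PORT A =====
def add_compliment (arr : List Int) : List Int :=
  -- new_arr = []; for num in arr: if num != 0: append num; append -1*num
  let new_arr : List Int :=
    arr.foldl (fun acc num => if num ≠ 0 then acc ++ [num, -1 * num] else acc) []
  -- new_arr.sort()
  let new_arr := PySem.List.sorted new_arr (fun x => x) false
  -- if 0 not in new_arr: new_arr.insert(len(new_arr) // 2, 0)
  if 0 ∉ new_arr then
    PySem.List.insert new_arr (PySem.Int.floordiv (PySem.List.len new_arr) 2) 0
  else new_arr

-- ===== PORT B =====
def add_compliment_alt (arr : List Int) : List Int :=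
  -- m = sorted(abs(n) for n in arr if n != 0)
  let m := PySem.List.sorted ((arr.filter (fun n => decide (n ≠ 0))).map (fun n => |n|)) (fun x => x) false
  -- [-x for x in reversed(m)] + [0] + m
  (m.reverse.map (fun x => -x)) ++ [0] ++ m

-- ===== PRECONDITION & SPEC =====
def Spec_add_compliment (arr : List Int) (out : List Int) : Prop := out = add_compliment_alt arr
instance (arr : List Int) (out : List Int) : Decidable (Spec_add_compliment arr out) := by unfold Spec_add_compliment; infer_instance

-- ===== CLAIM (what is proved, stated in full; the proofs are below) =====
def Claim_equal_add_compliment : Prop := ∀ (arr : List Int), Dom_add_compliment arr → Spec_add_compliment arr (add_compliment arr)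

-- ===== LEMMAS AND PROOFS =====

-- A's accumulation loop is the flatMap of [n, -n] over the nonzero entries.
theorem pv_doubled_eq (arr : List Int) (acc : List Int) :
    arr.foldl (fun acc num => if num ≠ 0 then acc ++ [num, -1 * num] else acc) acc
      = acc ++ (arr.filter (fun n => decide (n ≠ 0))).flatMap (fun n => [n, -n]) := by
  induction arr generalizing acc with
  | nil => simp
  | cons x xs ih =>
    rw [List.foldl_cons]
    by_cases hx : x = 0
    · rw [if_neg (by simp [hx]), ih]
      simp [hx]
    · rw [if_pos hx, ih]
      simp [hx, List.append_assoc]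

-- The doubled list is a permutation of the mirrored absolute values.
theorem pv_perm_double (ns : List Int) (h : ∀ n ∈ ns, n ≠ 0) :
    (ns.flatMap (fun n => [n, -n])).Perm
      (ns.map (fun n => -|n|) ++ ns.map (fun n => |n|)) := by
  induction ns with
  | nil => simp
  | cons x xs ih =>
    have hx : x ≠ 0 := h x (by simp)
    have ihx := ih (fun n hn => h n (by simp [hn]))
    have hmid : ((xs.map (fun n => -|n|)) ++ |x| :: xs.map (fun n => |n|)).Perm
        (|x| :: ((xs.map (fun n => -|n|)) ++ xs.map (fun n => |n|))) :=
      List.perm_middle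
    have hpair : ([x, -x] : List Int).Perm [-|x|, |x|] := by
      rcases lt_or_gt_of_ne hx with hlt | hgt
      · have h1 : -|x| = x := by rw [abs_of_neg hlt]; ring
        have h2 : (|x| : Int) = -x := by rw [abs_of_neg hlt]
        rw [h1, h2]
      · have h1 : (|x| : Int) = x := abs_of_pos hgt
        rw [h1]
        exact List.Perm.swap _ _ _
    have step1 : ((x :: xs).flatMap (fun n => [n, -n])).Perm
        ([-|x|, |x|] ++ ((xs.map (fun n => -|n|)) ++ xs.map (fun n => |n|))) := by
      have : ((x :: xs).flatMap (fun n => [n, -n]))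
          = [x, -x] ++ xs.flatMap (fun n => [n, -n]) := by simp
      rw [this]
      exact List.Perm.append hpair ihx
    have step2 : ([-|x|, |x|] ++ ((xs.map (fun n => -|n|)) ++ xs.map (fun n => |n|))).Perm
        (((x :: xs).map (fun n => -|n|)) ++ (x :: xs).map (fun n => |n|)) := by
      have : (((x :: xs).map (fun n => -|n|)) ++ (x :: xs).map (fun n => |n|))
          = -|x| :: ((xs.map (fun n => -|n|)) ++ |x| :: xs.map (fun n => |n|)) := by simp
      rw [this]
      exact List.Perm.cons _ hmid.symm
    exact step1.trans step2

-- Every element of B's sorted half is at least 1.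
theorem pv_mem_m_pos (arr : List Int) (y : Int)
    (hy : y ∈ PySem.List.sorted ((arr.filter (fun n => decide (n ≠ 0))).map (fun n => |n|)) (fun x => x) false) :
    1 ≤ y := by
  rw [PySem.List.mem_sorted] at hy
  obtain ⟨n, hn, rfl⟩ := List.mem_map.mp hy
  have : n ≠ 0 := by simpa using (List.mem_filter.mp hn).2
  exact Int.one_le_abs this

-- The sorted doubled list IS B's negatives-then-positives arrangement (without the 0).
theorem pv_sorted_doubled (arr : List Int) :
    PySem.List.sorted ((arr.filter (fun n => decide (n ≠ 0))).flatMap (fun n => [n, -n])) (fun x => x) false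
      = (PySem.List.sorted ((arr.filter (fun n => decide (n ≠ 0))).map (fun n => |n|)) (fun x => x) false).reverse.map (fun x => -x)
        ++ PySem.List.sorted ((arr.filter (fun n => decide (n ≠ 0))).map (fun n => |n|)) (fun x => x) false := by
  set ns := arr.filter (fun n => decide (n ≠ 0)) with hns
  set m := PySem.List.sorted (ns.map (fun n => |n|)) (fun x => x) false with hm
  have hns0 : ∀ n ∈ ns, n ≠ 0 := by
    intro n hn; simpa using (List.mem_filter.mp hn).2
  have hmperm : m.Perm (ns.map (fun n => |n|)) := PySem.List.sorted_perm _ _ _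
  have hperm : ((m.reverse.map (fun x => -x)) ++ m).Perm (ns.flatMap (fun n => [n, -n])) := by
    refine List.Perm.trans (List.Perm.append ?_ hmperm) (pv_perm_double ns hns0).symm
    have hmap : ((ns.map (fun n => |n|)).map (fun x => -x)) = ns.map (fun n => -|n|) := by
      simp [Function.comp]
    exact hmap ▸ (((List.reverse_perm m).map _).trans (hmperm.map _))
  have hmpos : ∀ y ∈ m, 1 ≤ y := fun y hy => pv_mem_m_pos arr y (hm ▸ hy)
  have hpw : ((m.reverse.map (fun x => -x)) ++ m).Pairwise (· ≤ ·) := by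
    rw [List.pairwise_append]
    refine ⟨?_, ?_, ?_⟩
    · rw [List.pairwise_map, List.pairwise_reverse]
      have := PySem.List.sorted_pairwise (ns.map (fun n => |n|)) (fun x => x)
      rw [← hm] at this
      exact this.imp (by intro a b hab; omega)
    · have := PySem.List.sorted_pairwise (ns.map (fun n => |n|)) (fun x => x)
      rw [← hm] at this
      exact this.imp (by intro a b hab; omega)
    · intro a ha b hb
      obtain ⟨x, hx, rfl⟩ := List.mem_map.mp ha
      have hx' : 1 ≤ x := hmpos x (List.mem_reverse.mp hx)
      have hb' : 1 ≤ b := hmpos b hb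
      omega
  exact PySem.List.sorted_id_eq_of_perm_of_pairwise _ _ hperm hpw

theorem add_compliment_eq_alt (arr : List Int) :
    add_compliment arr = add_compliment_alt arr := by
  simp only [add_compliment, add_compliment_alt]
  rw [pv_doubled_eq, List.nil_append, pv_sorted_doubled]
  set m := PySem.List.sorted ((arr.filter (fun n => decide (n ≠ 0))).map (fun n => |n|)) (fun x => x) false with hm
  set L := m.reverse.map (fun x => -x) with hL
  have hmpos : ∀ y ∈ m, 1 ≤ y := fun y hy => pv_mem_m_pos arr y (hm ▸ hy)
  have h0 : (0 : Int) ∉ L ++ m := by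
    intro h0
    rcases List.mem_append.mp h0 with h | h
    · obtain ⟨x, hx, hx0⟩ := List.mem_map.mp h
      have := hmpos x (List.mem_reverse.mp hx); omega
    · have := hmpos 0 h; omega
  rw [if_pos h0]
  have hlen : L.length = m.length := by simp [hL]
  have hlenI : PySem.List.len (L ++ m) = 2 * (m.length : Int) := by
    simp [PySem.List.len_eq, hlen]; ring
  have hdiv : PySem.Int.floordiv (PySem.List.len (L ++ m)) 2 = (m.length : Int) := by
    rw [hlenI, PySem.Int.floordiv_eq_ediv_of_pos (by omega)]
    omega
  rw [hdiv, ← hlen, PySem.List.insert_natCast _ _ _ (by simp [hlen])]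
  simp

-- ===== VERDICT (by name: the statement is the Claim_ definition above) =====
theorem add_compliment_spec : Claim_equal_add_compliment := by
  intro arr _
  exact add_compliment_eq_alt arr
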